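-- pv_equiv track=rewrite | github.com/elnur1502/Portfolio | Big-Data/Project2.py | countTriangles2
-- ===== SOURCE A (Python) =====
-- from collections import defaultdict
--
-- def countTriangles2(colors_tuple, edges, rand_a, rand_b, p, num_colors):
--     #We assume colors_tuple to be already sorted by increasing colors. Just transform in a list for simplicity
--     colors = list(colors_tuple)
--     #Create a dictionary for adjacency list
--     neighbors = defaultdict(set)
--     #Creare a dictionary for storing node colors
--     node_colors = dict()
--     for edge in edges:
--
--         u, v = edge
--         node_colors[u]= ((rand_a*u+rand_b)%p)%num_colors
--         node_colors[v]= ((rand_a*v+rand_b)%p)%num_colors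
--         neighbors[u].add(v)
--         neighbors[v].add(u)
--
--     # Initialize the triangle count to zero
--     triangle_count = 0
--
--     # Iterate over each vertex in the graph
--     for v in neighbors:
--         # Iterate over each pair of neighbors of v
--         for u in neighbors[v]:
--             if u > v:
--                 for w in neighbors[u]:
--                     # If w is also a neighbor of v, then we have a triangle
--                     if w > u and w in neighbors[v]:
--                         # Sort colors by increasing values
--                         triangle_colors = sorted((node_colors[u], node_colors[v], node_colors[w]))
--                         # If triangle has the right colors, count it.
--                         if colors==triangle_colors:
--                             triangle_count += 1
--     # Return the total number of triangles in the graph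
--     return triangle_count
-- ===== SOURCE B (Python) =====
-- def merge_common(xs, ys):
--     # common elements of two strictly increasing lists, by a two-pointer merge
--     i = j = 0
--     out = []
--     while i < len(xs) and j < len(ys):
--         if xs[i] < ys[j]:
--             i += 1
--         elif ys[j] < xs[i]:
--             j += 1
--         else:
--             out.append(xs[i])
--             i += 1
--             j += 1
--     return out
--
--
-- def countTriangles2(colors_tuple, edges, rand_a, rand_b, p, num_colors):
--     colors = list(colors_tuple)
--     # adjacency sets
--     adj = {}
--     for a, b in edges:
--         adj.setdefault(a, set()).add(b)
--         adj.setdefault(b, set()).add(a)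
--     # hash color of every node
--     color = {x: ((rand_a * x + rand_b) % p) % num_colors for x in adj}
--     # forward adjacency: sorted list of strictly higher neighbours of each node
--     fwd = {v: sorted(x for x in nv if x > v) for v, nv in adj.items()}
--     count = 0
--     for v, hv in fwd.items():
--         for u in hv:
--             for w in merge_common(hv, fwd[u]):
--                 if sorted((color[u], color[v], color[w])) == colors:
--                     count += 1
--     return count
-- ===== Notes on version B (the rewrite author's own statement) =====
-- stated objective: alternative
-- what changed: Replaces A's scan of u's whole neighbourhood with per-element membership tests into neighbors[v] by a forward-adjacency algorithm: each node gets a sorted list of its strictly higher neighbours, built once, and the common higher neighbours of an edge's endpoints are found by a two-pointer merge of two sorted lists.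
import Mathlib
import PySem

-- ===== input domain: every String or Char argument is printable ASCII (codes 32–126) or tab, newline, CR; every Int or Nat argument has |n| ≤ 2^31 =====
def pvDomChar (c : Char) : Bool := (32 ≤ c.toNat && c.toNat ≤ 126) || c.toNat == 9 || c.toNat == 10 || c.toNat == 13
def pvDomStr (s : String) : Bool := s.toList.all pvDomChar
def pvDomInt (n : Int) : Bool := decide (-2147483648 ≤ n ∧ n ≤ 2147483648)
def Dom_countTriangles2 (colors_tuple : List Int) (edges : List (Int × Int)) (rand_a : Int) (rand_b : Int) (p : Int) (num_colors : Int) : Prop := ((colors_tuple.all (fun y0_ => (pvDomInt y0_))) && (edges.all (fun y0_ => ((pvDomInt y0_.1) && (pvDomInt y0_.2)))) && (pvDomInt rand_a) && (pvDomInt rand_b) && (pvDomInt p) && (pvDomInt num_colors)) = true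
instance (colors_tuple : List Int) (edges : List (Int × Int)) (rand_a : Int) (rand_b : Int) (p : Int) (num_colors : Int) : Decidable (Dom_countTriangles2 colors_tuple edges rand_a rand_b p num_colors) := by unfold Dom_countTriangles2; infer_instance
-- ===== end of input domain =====

-- B replaces A's scan of u's whole neighbourhood (with membership tests into neighbors[v]) by a
-- forward-adjacency algorithm: sorted lists of strictly higher neighbours, intersected by a
-- two-pointer merge (objective: alternative algorithm, similar cost).

-- ===== PORT A =====
-- one iteration of A's edge loop: node_colors assignments, then the two symmetric adjacency adds
-- (defaultdict's neighbors[u].add(v) is Dict.modify with default empty set)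
def pyAStep (rand_a rand_b p num_colors : Int)
    (st : PySem.Dict Int (PySem.Set Int) × PySem.Dict Int Int) (e : Int × Int) :
    PySem.Dict Int (PySem.Set Int) × PySem.Dict Int Int :=
  let u := e.1
  let v := e.2
  let nc := (st.2.insert u (PySem.Int.mod (PySem.Int.mod (rand_a * u + rand_b) p) num_colors)).insert
      v (PySem.Int.mod (PySem.Int.mod (rand_a * v + rand_b) p) num_colors)
  let nb := (st.1.modify u PySem.Set.empty (fun s => PySem.Set.add s v)).modify
      v PySem.Set.empty (fun s => PySem.Set.add s u)
  (nb, nc)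

def countTriangles2 (colors_tuple : List Int) (edges : List (Int × Int)) (rand_a : Int) (rand_b : Int) (p : Int) (num_colors : Int) : Int :=
  let colors := colors_tuple
  let st := edges.foldl (pyAStep rand_a rand_b p num_colors) (PySem.Dict.empty, PySem.Dict.empty)
  let neighbors := st.1
  let node_colors := st.2
  neighbors.keys.foldl (fun cnt v =>
    (neighbors.getD v PySem.Set.empty).foldl (fun cnt u =>
      if u > v then
        (neighbors.getD u PySem.Set.empty).foldl (fun cnt w =>
          if w > u ∧ w ∈ neighbors.getD v PySem.Set.empty then
            if colors = PySem.List.sorted [node_colors.getD u 0, node_colors.getD v 0, node_colors.getD w 0] (fun c => c) then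
              cnt + 1
            else cnt
          else cnt) cnt
      else cnt) cnt) 0

-- ===== PORT B =====
-- B's merge_common while loop over two index pointers, as the equivalent structural recursion
-- consuming the two lists' fronts (exact: same comparisons, same output order)
def mergeCommon : List Int → List Int → List Int
  | [], _ => []
  | _ :: _, [] => []
  | x :: xs, y :: ys =>
    if x < y then mergeCommon xs (y :: ys)
    else if y < x then mergeCommon (x :: xs) ys
    else x :: mergeCommon xs ys

-- one iteration of B's edge loop (adj.setdefault(a,set()).add(b) is Dict.modify with default empty set)
def pyBStep (st : PySem.Dict Int (PySem.Set Int)) (e : Int × Int) : PySem.Dict Int (PySem.Set Int) :=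
  (st.modify e.1 PySem.Set.empty (fun s => PySem.Set.add s e.2)).modify
    e.2 PySem.Set.empty (fun s => PySem.Set.add s e.1)

def countTriangles2_alt (colors_tuple : List Int) (edges : List (Int × Int)) (rand_a : Int) (rand_b : Int) (p : Int) (num_colors : Int) : Int :=
  let colors := colors_tuple
  let adj := edges.foldl pyBStep PySem.Dict.empty
  let color := adj.keys.foldl (fun c x =>
    c.insert x (PySem.Int.mod (PySem.Int.mod (rand_a * x + rand_b) p) num_colors)) PySem.Dict.empty
  let fwd := adj.items.foldl (fun f it =>
    f.insert it.1 (PySem.List.sorted (it.2.filter (fun x => decide (x > it.1))) (fun c => c))) PySem.Dict.empty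
  fwd.items.foldl (fun cnt vh =>
    vh.2.foldl (fun cnt u =>
      (mergeCommon vh.2 (fwd.getD u [])).foldl (fun cnt w =>
        if PySem.List.sorted [color.getD u 0, color.getD vh.1 0, color.getD w 0] (fun c => c) = colors then
          cnt + 1
        else cnt) cnt) cnt) 0

-- ===== PRECONDITION & SPEC =====
-- Pre_ excludes exactly the inputs where the Python A raises ZeroDivisionError: a nonempty edge
-- list with p = 0 or num_colors = 0 (the '%' in the edge loop); B raises there too.
def Pre_countTriangles2 (colors_tuple : List Int) (edges : List (Int × Int)) (rand_a : Int) (rand_b : Int) (p : Int) (num_colors : Int) : Prop :=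
  edges = [] ∨ (p ≠ 0 ∧ num_colors ≠ 0)
instance (colors_tuple : List Int) (edges : List (Int × Int)) (rand_a : Int) (rand_b : Int) (p : Int) (num_colors : Int) : Decidable (Pre_countTriangles2 colors_tuple edges rand_a rand_b p num_colors) := by unfold Pre_countTriangles2; infer_instance

def pvWitness_countTriangles2 : List Int × (List (Int × Int)) × Int × Int × Int × Int :=
  ([0, 0, 0], [(1, 2), (2, 3), (1, 3)], 1, 0, 7, 2)

def Spec_countTriangles2 (colors_tuple : List Int) (edges : List (Int × Int)) (rand_a : Int) (rand_b : Int) (p : Int) (num_colors : Int) (out : Int) : Prop := out = countTriangles2_alt colors_tuple edges rand_a rand_b p num_colors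
instance (colors_tuple : List Int) (edges : List (Int × Int)) (rand_a : Int) (rand_b : Int) (p : Int) (num_colors : Int) (out : Int) : Decidable (Spec_countTriangles2 colors_tuple edges rand_a rand_b p num_colors out) := by unfold Spec_countTriangles2; infer_instance

-- ===== CLAIM (what is proved, stated in full; the proofs are below) =====
def Claim_equal_countTriangles2 : Prop := ∀ (colors_tuple : List Int) (edges : List (Int × Int)) (rand_a : Int) (rand_b : Int) (p : Int) (num_colors : Int), Dom_countTriangles2 colors_tuple edges rand_a rand_b p num_colors → Pre_countTriangles2 colors_tuple edges rand_a rand_b p num_colors → Spec_countTriangles2 colors_tuple edges rand_a rand_b p num_colors (countTriangles2 colors_tuple edges rand_a rand_b p num_colors)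

-- ===== LEMMAS AND PROOFS =====

lemma pvSumMapFilter (l : List Int) (p : Int → Prop) [DecidablePred p] (g : Int → Int) :
    ((l.filter (fun x => decide (p x))).map g).sum = (l.map (fun u => if p u then g u else 0)).sum := by
  induction l with
  | nil => rfl
  | cons x xs ih =>
    by_cases h : p x <;> simp [h, ih]

lemma pvCountPSwap (l₁ l₂ : List Int) (h₁ : l₁.Nodup) (h₂ : l₂.Nodup) (P : Int → Prop) [DecidablePred P] :
    l₁.countP (fun x => decide (x ∈ l₂ ∧ P x)) = l₂.countP (fun x => decide (x ∈ l₁ ∧ P x)) := by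
  rw [List.countP_eq_length_filter, List.countP_eq_length_filter,
    ← List.toFinset_card_of_nodup (h₁.filter _), ← List.toFinset_card_of_nodup (h₂.filter _)]
  congr 1
  ext x
  simp only [List.mem_toFinset, List.mem_filter, decide_eq_true_eq]
  tauto

lemma pvSortedLt (l : List Int) (h : l.Nodup) :
    (PySem.List.sorted l (fun c => c)).Pairwise (· < ·) := by
  have h1 := PySem.List.sorted_pairwise l (fun c => c)
  have h2 : (PySem.List.sorted l (fun c => c)).Nodup :=
    ((PySem.List.sorted_perm l (fun c => c) false).nodup_iff).mpr h
  exact (h1.and h2).imp (fun hx => lt_of_le_of_ne hx.1 hx.2)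

lemma pvMergeCommon_eq_filter (xs ys : List Int) (hx : xs.Pairwise (· < ·)) (hy : ys.Pairwise (· < ·)) :
    mergeCommon xs ys = xs.filter (fun w => decide (w ∈ ys)) := by
  induction xs, ys using mergeCommon.induct with
  | case1 ys => simp [mergeCommon]
  | case2 x xs => simp [mergeCommon]
  | case3 x xs y ys hlt ih =>
    have hx' := List.Pairwise.of_cons hx
    have hxy : x ∉ y :: ys := by
      intro hmem
      rcases List.mem_cons.mp hmem with rfl | h
      · omega
      · have := (List.pairwise_cons.mp hy).1 x h
        omega
    rw [mergeCommon, if_pos hlt, ih hx' hy,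
      List.filter_cons_of_neg (p := fun w => decide (w ∈ y :: ys)) (by simp [hxy])]
  | case4 x xs y ys hlt hgt ih =>
    have hy' := List.Pairwise.of_cons hy
    rw [mergeCommon, if_neg hlt, if_pos hgt, ih hx hy']
    apply List.filter_congr
    intro w hw
    have hyw : y < w := by
      rcases List.mem_cons.mp hw with rfl | h
      · exact hgt
      · exact lt_trans hgt ((List.pairwise_cons.mp hx).1 w h)
    simp only [decide_eq_decide, List.mem_cons]
    constructor
    · exact Or.inr
    · rintro (rfl | h)
      · omega
      · exact h
  | case5 x xs y ys hlt hgt ih =>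
    have heq : x = y := by omega
    have hx' := List.Pairwise.of_cons hx
    have hy' := List.Pairwise.of_cons hy
    rw [mergeCommon, if_neg hlt, if_neg hgt, ih hx' hy',
      List.filter_cons_of_pos (p := fun w => decide (w ∈ y :: ys)) (by simp [heq])]
    congr 1
    apply List.filter_congr
    intro w hw
    have hxw : x < w := (List.pairwise_cons.mp hx).1 w hw
    simp only [decide_eq_decide, List.mem_cons]
    constructor
    · exact Or.inr
    · rintro (rfl | h)
      · omega
      · exact h

lemma pvReshapeB {γ : Type} (K : List γ) (J : γ → List Int) (M : γ → Int → List Int)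
    (R : γ → Int → Int → Prop) [∀ vh u w, Decidable (R vh u w)] :
    K.foldl (fun cnt vh => (J vh).foldl (fun cnt u => (M vh u).foldl
        (fun cnt w => if R vh u w then cnt + 1 else cnt) cnt) cnt) 0
    = (K.map (fun vh => ((J vh).map (fun u =>
        (((M vh u).countP (fun w => decide (R vh u w))) : Int))).sum)).sum := by
  rw [PySem.List.foldl_congr_mem K _
    (fun cnt vh => cnt + ((J vh).map (fun u =>
        (((M vh u).countP (fun w => decide (R vh u w))) : Int))).sum) 0 ?_]
  · rw [PySem.List.foldl_add]; simp
  · intro acc vh _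
    rw [PySem.List.foldl_congr_mem (J vh) _
      (fun cnt u => cnt + (((M vh u).countP (fun w => decide (R vh u w))) : Int)) acc ?_]
    · rw [PySem.List.foldl_add]
    · intro acc' u _
      rw [PySem.List.foldl_ite_add_one]

lemma pvReshapeA (K : List Int) (N : Int → List Int) (P Q : Int → Int → Int → Prop)
    [∀ u v w, Decidable (P u v w)] [∀ u v w, Decidable (Q u v w)] :
    K.foldl (fun cnt v => (N v).foldl (fun cnt u =>
      if u > v then
        (N u).foldl (fun cnt w =>
          if P u v w then (if Q u v w then cnt + 1 else cnt) else cnt) cnt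
      else cnt) cnt) 0
    = (K.map (fun v => ((N v).map (fun u =>
        if u > v then (((N u).countP (fun w => decide (P u v w ∧ Q u v w))) : Int) else 0)).sum)).sum := by
  rw [PySem.List.foldl_congr_mem K _
    (fun cnt v => cnt + ((N v).map (fun u =>
        if u > v then (((N u).countP (fun w => decide (P u v w ∧ Q u v w))) : Int) else 0)).sum) 0 ?_]
  · rw [PySem.List.foldl_add]; simp
  · intro acc v _
    rw [PySem.List.foldl_congr_mem (N v) _
      (fun cnt u => cnt + (if u > v then (((N u).countP (fun w => decide (P u v w ∧ Q u v w))) : Int) else 0)) acc ?_]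
    · rw [PySem.List.foldl_add]
    · intro acc' u _
      by_cases hu : u > v
      · simp only [if_pos hu]
        rw [PySem.List.foldl_congr_mem (N u) _
          (fun cnt w => if P u v w ∧ Q u v w then cnt + 1 else cnt) acc' ?_]
        · rw [PySem.List.foldl_ite_add_one]
        · intro a w _
          by_cases hP : P u v w <;> by_cases hQ : Q u v w <;> simp [hP, hQ]
      · simp [hu]

-- hash-colour formula shared by both ports (proof-side name)
def pvFc (ra rb p nc x : Int) : Int := PySem.Int.mod (PySem.Int.mod (ra * x + rb) p) nc

-- loop invariant of A's (and B's) edge loop: unique keys, duplicate-free neighbour sets,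
-- neighbour sets closed into the key list, and node_colors correct on every key
def pvInv (ra rb p nc : Int) (d : PySem.Dict Int (PySem.Set Int)) (c : PySem.Dict Int Int) : Prop :=
  d.keys.Nodup ∧
  (∀ v, (d.getD v PySem.Set.empty).Nodup) ∧
  (∀ v x, x ∈ d.getD v PySem.Set.empty → x ∈ d.keys) ∧
  (∀ x ∈ d.keys, c.getD x 0 = pvFc ra rb p nc x)

lemma pvMemKeys_pyBStep (d : PySem.Dict Int (PySem.Set Int)) (e : Int × Int) (x : Int) :
    x ∈ (pyBStep d e).keys ↔ x = e.2 ∨ x = e.1 ∨ x ∈ d.keys := by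
  unfold pyBStep
  rw [PySem.Dict.keys_modify, PySem.Dict.mem_keys_insert, PySem.Dict.keys_modify,
    PySem.Dict.mem_keys_insert]

lemma pvNodupKeys_pyBStep (d : PySem.Dict Int (PySem.Set Int)) (e : Int × Int)
    (h : d.keys.Nodup) : (pyBStep d e).keys.Nodup := by
  unfold pyBStep
  rw [PySem.Dict.keys_modify]
  apply PySem.Dict.nodup_keys_insert
  rw [PySem.Dict.keys_modify]
  exact PySem.Dict.nodup_keys_insert _ _ _ h

lemma pvGetD_pyBStep (d : PySem.Dict Int (PySem.Set Int)) (e : Int × Int) (v : Int) :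
    (pyBStep d e).getD v PySem.Set.empty =
      if v = e.2 then
        PySem.Set.add (if e.2 = e.1 then PySem.Set.add (d.getD e.1 PySem.Set.empty) e.2
          else d.getD e.2 PySem.Set.empty) e.1
      else if v = e.1 then PySem.Set.add (d.getD e.1 PySem.Set.empty) e.2
      else d.getD v PySem.Set.empty := by
  unfold pyBStep
  simp only [PySem.Dict.getD_modify]

lemma pvInv_step (ra rb p nc : Int) (d : PySem.Dict Int (PySem.Set Int))
    (c : PySem.Dict Int Int) (e : Int × Int) (h : pvInv ra rb p nc d c) :
    pvInv ra rb p nc (pyBStep d e) ((pyAStep ra rb p nc (d, c) e).2) := by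
  obtain ⟨hk, hs, hc, hcol⟩ := h
  refine ⟨pvNodupKeys_pyBStep d e hk, ?_, ?_, ?_⟩
  · intro v
    rw [pvGetD_pyBStep]
    split_ifs with h2 h1
    · exact PySem.Set.nodup_add _ _ (PySem.Set.nodup_add _ _ (hs e.1))
    · exact PySem.Set.nodup_add _ _ (hs e.2)
    · exact PySem.Set.nodup_add _ _ (hs e.1)
    · exact hs v
  · intro v x hx
    rw [pvGetD_pyBStep] at hx
    rw [pvMemKeys_pyBStep]
    split_ifs at hx with h2 h1 h1
    · rcases (PySem.Set.mem_add _ _ _).mp hx with hm | rfl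
      · rcases (PySem.Set.mem_add _ _ _).mp hm with hm' | rfl
        · exact Or.inr (Or.inr (hc _ _ hm'))
        · exact Or.inl rfl
      · exact Or.inr (Or.inl rfl)
    · rcases (PySem.Set.mem_add _ _ _).mp hx with hm | rfl
      · exact Or.inr (Or.inr (hc _ _ hm))
      · exact Or.inr (Or.inl rfl)
    · rcases (PySem.Set.mem_add _ _ _).mp hx with hm | rfl
      · exact Or.inr (Or.inr (hc _ _ hm))
      · exact Or.inl rfl
    · exact Or.inr (Or.inr (hc _ _ hx))
  · intro x hxk
    have hpair : (pyAStep ra rb p nc (d, c) e).2 =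
        (c.insert e.1 (pvFc ra rb p nc e.1)).insert e.2 (pvFc ra rb p nc e.2) := rfl
    rw [hpair, PySem.Dict.getD_insert, PySem.Dict.getD_insert]
    rcases (pvMemKeys_pyBStep d e x).mp hxk with rfl | rfl | hold
    · rw [if_pos rfl]
    · by_cases hx2 : e.1 = e.2
      · rw [if_pos hx2, hx2]
      · rw [if_neg hx2, if_pos rfl]
    · by_cases hx2 : x = e.2
      · rw [if_pos hx2, hx2]
      · by_cases hx1 : x = e.1
        · rw [if_neg hx2, if_pos hx1, hx1]
        · rw [if_neg hx2, if_neg hx1]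
          exact hcol x hold

lemma pvInv_init (ra rb p nc : Int) :
    pvInv ra rb p nc (PySem.Dict.empty : PySem.Dict Int (PySem.Set Int))
      (PySem.Dict.empty : PySem.Dict Int Int) := by
  refine ⟨?_, ?_, ?_, ?_⟩
  · rw [PySem.Dict.keys_empty]; exact List.nodup_nil
  · intro v; rw [PySem.Dict.getD_empty]; exact List.nodup_nil
  · intro v x hx; rw [PySem.Dict.getD_empty] at hx; cases hx
  · intro x hx; rw [PySem.Dict.keys_empty] at hx; cases hx

lemma pvFold (ra rb p nc : Int) (edges : List (Int × Int)) :
    ∀ (d : PySem.Dict Int (PySem.Set Int)) (c : PySem.Dict Int Int), pvInv ra rb p nc d c →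
      pvInv ra rb p nc (edges.foldl pyBStep d) ((edges.foldl (pyAStep ra rb p nc) (d, c)).2)
      ∧ (edges.foldl (pyAStep ra rb p nc) (d, c)).1 = edges.foldl pyBStep d := by
  induction edges with
  | nil => intro d c h; exact ⟨h, rfl⟩
  | cons e rest ih =>
    intro d c h
    have hstep := pvInv_step ra rb p nc d c e h
    have h1 : pyAStep ra rb p nc (d, c) e = (pyBStep d e, (pyAStep ra rb p nc (d, c) e).2) := rfl
    simp only [List.foldl_cons]
    rw [h1]
    exact ih (pyBStep d e) _ hstep

lemma pvColorB_getD (K : List Int) (hnd : K.Nodup) (g : Int → Int) (x : Int) (hx : x ∈ K) :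
    (K.foldl (fun c y => c.insert y (g y)) (PySem.Dict.empty : PySem.Dict Int Int)).getD x 0
      = g x := by
  have hitems : (K.foldl (fun c y => c.insert y (g y))
      (PySem.Dict.empty : PySem.Dict Int Int)).items = [] ++ K.map (fun y => (y, g y)) :=
    PySem.Dict.items_foldl_insert_fresh K (fun y => y) g PySem.Dict.empty
      (fun a _ => PySem.Dict.contains_empty a) (by simpa using hnd)
  apply PySem.Dict.getD_of_mem_items
  · rw [hitems]
    simp only [List.nil_append, List.mem_map]
    exact ⟨x, hx, rfl⟩
  · show ((K.foldl (fun c y => c.insert y (g y))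
      (PySem.Dict.empty : PySem.Dict Int Int)).items.map Prod.fst).Nodup
    rw [hitems]
    simpa [Function.comp_def] using hnd

lemma pvItemsFold_getD (l : List (Int × PySem.Set Int)) (hnd : (l.map Prod.fst).Nodup)
    (g : Int × PySem.Set Int → List Int) (k : Int) (s : PySem.Set Int) (hmem : (k, s) ∈ l) :
    (l.foldl (fun f it => f.insert it.1 (g it))
      (PySem.Dict.empty : PySem.Dict Int (List Int))).getD k [] = g (k, s) := by
  have hitems : (l.foldl (fun f it => f.insert it.1 (g it))
      (PySem.Dict.empty : PySem.Dict Int (List Int))).items = [] ++ l.map (fun it => (it.1, g it)) :=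
    PySem.Dict.items_foldl_insert_fresh l Prod.fst g PySem.Dict.empty
      (fun a _ => PySem.Dict.contains_empty _) hnd
  apply PySem.Dict.getD_of_mem_items
  · rw [hitems]
    simp only [List.nil_append, List.mem_map]
    exact ⟨(k, s), hmem, rfl⟩
  · show ((l.foldl (fun f it => f.insert it.1 (g it))
      (PySem.Dict.empty : PySem.Dict Int (List Int))).items.map Prod.fst).Nodup
    rw [hitems]
    simp only [List.nil_append, List.map_map]
    exact hnd

lemma pvItemsFold_items (l : List (Int × PySem.Set Int)) (hnd : (l.map Prod.fst).Nodup)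
    (g : Int × PySem.Set Int → List Int) :
    (l.foldl (fun f it => f.insert it.1 (g it))
      (PySem.Dict.empty : PySem.Dict Int (List Int))).items = l.map (fun it => (it.1, g it)) := by
  have := PySem.Dict.items_foldl_insert_fresh l Prod.fst g PySem.Dict.empty
      (fun a _ => PySem.Dict.contains_empty _) hnd
  simpa using this

-- the per-vertex equality: A's scan of N(u) with membership tests into N(v) counts the same
-- triples as B's merge of the two sorted higher-neighbour lists
lemma pvPerV (v : Int) (K : List Int) (N : Int → List Int) (colors : List Int)
    (F colA colB : Int → Int) (fwdD : Int → List Int)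
    (hNnd : ∀ u, (N u).Nodup)
    (hcl : ∀ a x, x ∈ N a → x ∈ K)
    (hvK : v ∈ K)
    (hA : ∀ x ∈ K, colA x = F x) (hB : ∀ x ∈ K, colB x = F x)
    (hf : ∀ u ∈ K, fwdD u = PySem.List.sorted ((N u).filter (fun x => decide (x > u))) (fun c => c)) :
    ((N v).map (fun u => if u > v then
        (((N u).countP (fun w => decide ((w > u ∧ w ∈ N v) ∧
          colors = PySem.List.sorted [colA u, colA v, colA w] (fun c => c)))) : Int)
      else 0)).sum
    = ((PySem.List.sorted ((N v).filter (fun x => decide (x > v))) (fun c => c)).map (fun u =>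
        (((mergeCommon (PySem.List.sorted ((N v).filter (fun x => decide (x > v))) (fun c => c))
            (fwdD u)).countP (fun w => decide
              (PySem.List.sorted [colB u, colB v, colB w] (fun c => c) = colors))) : Int))).sum := by
  set hv := PySem.List.sorted ((N v).filter (fun x => decide (x > v))) (fun c => c) with hhv
  have hvperm : hv.Perm ((N v).filter (fun x => decide (x > v))) :=
    PySem.List.sorted_perm _ _ _
  have hfil : ((N v).filter (fun x => decide (x > v))).Nodup := (hNnd v).filter _
  have hvlt : hv.Pairwise (· < ·) := pvSortedLt _ hfil
  have hvmem : ∀ u, u ∈ hv ↔ (u ∈ N v ∧ u > v) := by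
    intro u
    rw [hhv, PySem.List.mem_sorted, List.mem_filter]
    simp
  have hR1 : (hv.map (fun u => (((mergeCommon hv (fwdD u)).countP (fun w =>
        decide (PySem.List.sorted [colB u, colB v, colB w] (fun c => c) = colors))) : Int)))
      = hv.map (fun u => (((N v).countP (fun w => decide (w > v ∧ w ∈ N u ∧ w > u ∧
          colors = PySem.List.sorted [F u, F v, F w] (fun c => c)))) : Int)) := by
    apply List.map_congr_left
    intro u hu
    have humem := (hvmem u).mp hu
    have huK : u ∈ K := hcl v u humem.1
    have hfu : ((N u).filter (fun x => decide (x > u))).Nodup := (hNnd u).filter _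
    rw [hf u huK, pvMergeCommon_eq_filter hv _ hvlt (pvSortedLt _ hfu)]
    congr 1
    rw [List.countP_filter, List.Perm.countP_eq _ hvperm, List.countP_filter]
    apply List.countP_congr
    intro w hw
    have hwK : w ∈ K := hcl v w hw
    simp only [Bool.and_eq_true, decide_eq_true_eq, PySem.List.mem_sorted, List.mem_filter]
    rw [hB u huK, hB v hvK, hB w hwK]
    constructor
    · rintro ⟨⟨h1, h2, h3⟩, h4⟩
      exact ⟨h4, h2, h3, h1.symm⟩
    · rintro ⟨h4, h2, h3, h1⟩
      exact ⟨⟨h1.symm, h2, h3⟩, h4⟩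
  have hL1 : ((N v).map (fun u => if u > v then
        (((N u).countP (fun w => decide ((w > u ∧ w ∈ N v) ∧
          colors = PySem.List.sorted [colA u, colA v, colA w] (fun c => c)))) : Int)
      else 0))
      = (N v).map (fun u => if u > v then
        (((N v).countP (fun w => decide (w > v ∧ w ∈ N u ∧ w > u ∧
          colors = PySem.List.sorted [F u, F v, F w] (fun c => c)))) : Int) else 0) := by
    apply List.map_congr_left
    intro u hu
    by_cases hug : u > v
    · rw [if_pos hug, if_pos hug]
      congr 1
      have huK : u ∈ K := hcl v u hu
      have s1 : (N u).countP (fun w => decide ((w > u ∧ w ∈ N v) ∧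
            colors = PySem.List.sorted [colA u, colA v, colA w] (fun c => c)))
          = (N u).countP (fun w => decide (w ∈ N v ∧ (w > u ∧
            colors = PySem.List.sorted [F u, F v, F w] (fun c => c)))) := by
        apply List.countP_congr
        intro w hw
        have hwK : w ∈ K := hcl u w hw
        simp only [decide_eq_true_eq]
        rw [hA u huK, hA v hvK, hA w hwK]
        tauto
      rw [s1, pvCountPSwap (N u) (N v) (hNnd u) (hNnd v)
        (fun w => w > u ∧ colors = PySem.List.sorted [F u, F v, F w] (fun c => c))]
      apply List.countP_congr
      intro w _
      simp only [decide_eq_true_eq]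
      constructor
      · rintro ⟨h1, h2, h3⟩
        exact ⟨by omega, h1, h2, h3⟩
      · rintro ⟨_, h1, h2, h3⟩
        exact ⟨h1, h2, h3⟩
    · rw [if_neg hug, if_neg hug]
  rw [hL1, hR1]
  rw [List.Perm.sum_eq (List.Perm.map _ hvperm)]
  exact (pvSumMapFilter (N v) (fun x => x > v) _).symm



theorem pvWitness_ok : Dom_countTriangles2 pvWitness_countTriangles2.1 pvWitness_countTriangles2.2.1 pvWitness_countTriangles2.2.2.1 pvWitness_countTriangles2.2.2.2.1 pvWitness_countTriangles2.2.2.2.2.1 pvWitness_countTriangles2.2.2.2.2.2 ∧ Pre_countTriangles2 pvWitness_countTriangles2.1 pvWitness_countTriangles2.2.1 pvWitness_countTriangles2.2.2.1 pvWitness_countTriangles2.2.2.2.1 pvWitness_countTriangles2.2.2.2.2.1 pvWitness_countTriangles2.2.2.2.2.2 := by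
  decide

-- ===== VERDICT (by name: the statement is the Claim_ definition above) =====
theorem countTriangles2_spec : Claim_equal_countTriangles2 := by
  unfold Claim_equal_countTriangles2
  intro ct edges ra rb p nc _hdom _hpre
  unfold Spec_countTriangles2
  obtain ⟨⟨hKnd, hNnd, hcl, hcolA⟩, hfst⟩ :=
    pvFold ra rb p nc edges PySem.Dict.empty PySem.Dict.empty (pvInv_init ra rb p nc)
  simp only [countTriangles2, countTriangles2_alt]
  rw [hfst]
  set adj := edges.foldl pyBStep PySem.Dict.empty with hadj
  set ncA := (edges.foldl (pyAStep ra rb p nc)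
    (PySem.Dict.empty, PySem.Dict.empty)).2 with hnca
  set colorB := adj.keys.foldl (fun c x =>
    c.insert x (PySem.Int.mod (PySem.Int.mod (ra * x + rb) p) nc)) PySem.Dict.empty with hcb
  set fwd := adj.items.foldl (fun f it =>
    f.insert it.1 (PySem.List.sorted (it.2.filter (fun x => decide (x > it.1)))
      (fun c => c))) PySem.Dict.empty with hfw
  have hKnd2 : ((adj.items).map Prod.fst).Nodup := hKnd
  have hfwditems : fwd.items = adj.keys.map (fun k =>
      (k, PySem.List.sorted ((adj.getD k PySem.Set.empty).filter
        (fun x => decide (x > k))) (fun c => c))) := by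
    rw [hfw, pvItemsFold_items adj.items hKnd2 _,
      PySem.Dict.items_eq_map_keys adj hKnd PySem.Set.empty, List.map_map]
    rfl
  have hfwdD : ∀ u ∈ adj.keys, fwd.getD u [] =
      PySem.List.sorted ((adj.getD u PySem.Set.empty).filter
        (fun x => decide (x > u))) (fun c => c) := by
    intro u hu
    have hmemit : (u, adj.getD u PySem.Set.empty) ∈ adj.items := by
      rw [PySem.Dict.items_eq_map_keys adj hKnd PySem.Set.empty]
      exact List.mem_map.mpr ⟨u, hu, rfl⟩
    exact pvItemsFold_getD adj.items hKnd2 _ u _ hmemit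
  have hcolB : ∀ x ∈ adj.keys, colorB.getD x 0 = pvFc ra rb p nc x :=
    fun x hx => pvColorB_getD adj.keys hKnd _ x hx
  refine Eq.trans (pvReshapeA adj.keys (fun a => adj.getD a PySem.Set.empty) _ _)
    (Eq.trans ?_ (pvReshapeB fwd.items (fun vh => vh.2)
      (fun vh u => mergeCommon vh.2 (fwd.getD u [])) _).symm)
  rw [hfwditems, List.map_map]
  exact congrArg List.sum (List.map_congr_left (fun v hv =>
    pvPerV v adj.keys (fun a => adj.getD a PySem.Set.empty) ct (pvFc ra rb p nc)
      (fun x => ncA.getD x 0) (fun x => colorB.getD x 0) (fun u => fwd.getD u [])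
      hNnd hcl hv hcolA hcolB hfwdD))
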